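-- pv_equiv track=rewrite | github.com/abushka110/kpi-code-pbf | python/homework-2/9.py | calculate_y
-- ===== SOURCE A (Python) =====
-- def calculate_y(n):
--   y = 0
--   for i in range(1, n + 1):
--     factorial = 1
--     for j in range(1, i + 1):
--       factorial *= j
--     y += factorial
--   return y
-- ===== SOURCE B (Python) =====
-- def calculate_y(n):
--   y = 0
--   fact = 1
--   for i in range(1, n + 1):
--     fact *= i
--     y += fact
--   return y
-- ===== Notes on version B (the rewrite author's own statement) =====
-- stated objective: faster
-- what changed: B keeps a running factorial updated once per outer iteration instead of recomputing each factorial with an inner loop, removing the nested loop.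
import Mathlib
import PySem

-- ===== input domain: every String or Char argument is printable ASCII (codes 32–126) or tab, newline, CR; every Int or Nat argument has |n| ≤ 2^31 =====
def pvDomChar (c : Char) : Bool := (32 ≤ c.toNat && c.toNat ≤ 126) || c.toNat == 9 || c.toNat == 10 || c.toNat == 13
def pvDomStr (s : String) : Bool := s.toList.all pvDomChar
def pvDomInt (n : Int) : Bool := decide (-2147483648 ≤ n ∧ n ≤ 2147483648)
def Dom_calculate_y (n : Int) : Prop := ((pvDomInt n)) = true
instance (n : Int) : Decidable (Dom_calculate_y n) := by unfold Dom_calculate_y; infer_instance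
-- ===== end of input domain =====

-- B replaces A's nested factorial loop with a running factorial (asymptotically faster).
-- ===== PORT A =====
def calculate_y (n : Int) : Int :=
  (PySem.List.pyRange 1 (n + 1) 1).foldl
    (fun y i =>
      y + (PySem.List.pyRange 1 (i + 1) 1).foldl (fun factorial j => factorial * j) 1)
    0

-- ===== PORT B =====
def calculate_y_alt (n : Int) : Int :=
  ((PySem.List.pyRange 1 (n + 1) 1).foldl
    (fun (s : Int × Int) i => (s.1 + s.2 * i, s.2 * i)) (0, 1)).1

-- ===== PRECONDITION & SPEC =====
def Spec_calculate_y (n : Int) (out : Int) : Prop := out = calculate_y_alt n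
instance (n : Int) (out : Int) : Decidable (Spec_calculate_y n out) := by unfold Spec_calculate_y; infer_instance

-- ===== CLAIM (what is proved, stated in full; the proofs are below) =====
def Claim_equal_calculate_y : Prop := ∀ (n : Int), Dom_calculate_y n → Spec_calculate_y n (calculate_y n)

-- ===== LEMMAS AND PROOFS =====

-- B's pair state over range(1, m+1) carries exactly (A's partial sum, the factorial of m).
theorem pv_both (m : Nat) :
    (PySem.List.pyRange 1 ((m : Int) + 1) 1).foldl
        (fun (s : Int × Int) i => (s.1 + s.2 * i, s.2 * i)) (0, 1)
      = ((PySem.List.pyRange 1 ((m : Int) + 1) 1).foldl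
          (fun y i =>
            y + (PySem.List.pyRange 1 (i + 1) 1).foldl (fun factorial j => factorial * j) 1) 0,
         (PySem.List.pyRange 1 ((m : Int) + 1) 1).foldl (fun factorial j => factorial * j) 1) := by
  induction m with
  | zero => simp [PySem.List.pyRange_one_eq_nil]
  | succ m ih =>
      have h1 : (1 : Int) ≤ (m : Int) + 1 := by omega
      have hsplit : PySem.List.pyRange 1 (((m : Nat) + 1 : Int) + 1) 1
          = PySem.List.pyRange 1 ((m : Int) + 1) 1 ++ [(m : Int) + 1] := by
        rw [PySem.List.pyRange_one_succ_right h1]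
      push_cast
      rw [hsplit, List.foldl_append, List.foldl_append, List.foldl_append, ih]
      simp only [List.foldl_cons, List.foldl_nil]
      rw [hsplit]
      simp [List.foldl_append]

theorem pv_eq (n : Int) : calculate_y n = calculate_y_alt n := by
  unfold calculate_y calculate_y_alt
  rcases (by omega : n ≤ 0 ∨ 0 < n) with h | h
  · rw [PySem.List.pyRange_one_eq_nil (by omega)]
    rfl
  · have hn : n = ((n.toNat : Int)) := by omega
    rw [hn, pv_both n.toNat]

-- ===== VERDICT (by name: the statement is the Claim_ definition above) =====
theorem calculate_y_spec : Claim_equal_calculate_y := by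
  intro n _
  unfold Spec_calculate_y
  exact pv_eq n
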